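-- pv_equiv track=rewrite | github.com/DanielSantos01/Bovespa | dashboard.py | find_closed_intervals
-- ===== SOURCE A (Python) =====
-- def find_closed_intervals(years):
--   if len(years) == 0:
--     return []
--
--   closed_intervals = []
--   start_year = years[0]
--   end_year = years[0]
--
--   for year in years[1:]:
--     if year == end_year + 1:
--       end_year = year
--     else:
--       if start_year == end_year:
--         closed_intervals.append(str(start_year))
--       else:
--         closed_intervals.append(f"{start_year}-{end_year}")
--       start_year = end_year = year
--
--   if start_year == end_year:
--     closed_intervals.append(str(start_year))
--   else:
--     closed_intervals.append(f"{start_year}-{end_year}")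
--
--   return closed_intervals
-- ===== SOURCE B (Python) =====
-- def find_closed_intervals(years):
--     n = len(years)
--     # stage 1: boundary indices where a new run of consecutive years starts
--     cuts = [i for i in range(n) if i == 0 or years[i] != years[i - 1] + 1]
--     # stage 2: pair each boundary with the next one (or n) and format the segment
--     return [str(years[a]) if b - a == 1 else f"{years[a]}-{years[b - 1]}"
--             for a, b in zip(cuts, cuts[1:] + [n])]
-- ===== Notes on version B (the rewrite author's own statement) =====
-- stated objective: alternative
-- what changed: Replaces A's single stateful scan carrying (accumulator, start_year, end_year) with a stateless staged pipeline over indices: a comprehension over range(n) collects the boundary indices where consecutiveness breaks, these boundaries are zipped with their shifted copy to form (start,end) index pairs, and a second comprehension formats each pair.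
import Mathlib
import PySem

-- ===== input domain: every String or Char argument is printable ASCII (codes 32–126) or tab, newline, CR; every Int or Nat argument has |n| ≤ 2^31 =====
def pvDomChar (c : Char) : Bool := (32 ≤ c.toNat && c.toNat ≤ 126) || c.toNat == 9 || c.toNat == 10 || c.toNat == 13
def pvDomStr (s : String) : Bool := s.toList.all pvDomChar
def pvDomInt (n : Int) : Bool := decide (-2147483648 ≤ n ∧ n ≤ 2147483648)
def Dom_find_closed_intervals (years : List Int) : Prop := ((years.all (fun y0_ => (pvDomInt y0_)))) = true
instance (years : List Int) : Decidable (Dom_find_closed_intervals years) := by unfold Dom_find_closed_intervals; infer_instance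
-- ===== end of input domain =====

-- B replaces A's stateful (accumulator, start, end) scan with a stateless staged index
-- pipeline (collect boundary indices, zip with shifted boundaries, format each pair);
-- alternative decomposition, same O(n) cost.


-- ===== PORT A =====
-- single-year vs range formatting, as in both of A's append branches
def pvFmtA (s e : Int) : String :=
  if s = e then PySem.Int.toStr s else PySem.Int.toStr s ++ "-" ++ PySem.Int.toStr e

-- the loop over years[1:] with state (closed_intervals, start_year, end_year); the
-- [] case is the post-loop flush
def pvLoopA (acc : List String) (s e : Int) : List Int → List String
  | [] => acc ++ [pvFmtA s e]
  | y :: t =>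
      if y = e + 1 then pvLoopA acc s y t
      else pvLoopA (acc ++ [pvFmtA s e]) y y t

def find_closed_intervals (years : List Int) : List String :=
  match years with
  | [] => []
  | y0 :: rest => pvLoopA [] y0 y0 rest

-- ===== PORT B =====
-- stage-1 predicate: 'i == 0 or years[i] != years[i-1] + 1' (indices produced by
-- range(n) are in range, so Python's years[i] is exactly getD here)
def pvIsCut (years : List Int) (i : Nat) : Bool :=
  i == 0 || !(years.getD i 0 == years.getD (i - 1) 0 + 1)

-- stage-1 comprehension: [i for i in range(n) if …]
def pvCuts (years : List Int) : List Nat :=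
  (List.range years.length).filter (pvIsCut years)

-- stage-2 element: str(years[a]) if b - a == 1 else f"{years[a]}-{years[b-1]}"
def pvFmtB (years : List Int) (a b : Nat) : String :=
  if b - a == 1 then PySem.Int.toStr (years.getD a 0)
  else PySem.Int.toStr (years.getD a 0) ++ "-" ++ PySem.Int.toStr (years.getD (b - 1) 0)

def find_closed_intervals_alt (years : List Int) : List String :=
  let cuts := pvCuts years
  (cuts.zip (cuts.tail ++ [years.length])).map (fun p => pvFmtB years p.1 p.2)

-- ===== PRECONDITION & SPEC =====
def Spec_find_closed_intervals (years : List Int) (out : List String) : Prop := out = find_closed_intervals_alt years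
instance (years : List Int) (out : List String) : Decidable (Spec_find_closed_intervals years out) := by unfold Spec_find_closed_intervals; infer_instance

-- ===== CLAIM (what is proved, stated in full; the proofs are below) =====
def Claim_equal_find_closed_intervals : Prop := ∀ (years : List Int), Dom_find_closed_intervals years → Spec_find_closed_intervals years (find_closed_intervals years)

-- ===== LEMMAS AND PROOFS =====

-- length of the maximal chain of consecutive successors continuing value e
def pvChain (e : Int) : List Int → Nat
  | [] => 0
  | y :: t => if y = e + 1 then pvChain y t + 1 else 0

theorem pvChain_le (e : Int) (t : List Int) : pvChain e t ≤ t.length := by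
  induction t generalizing e with
  | nil => simp [pvChain]
  | cons y t ih =>
      simp only [pvChain, List.length_cons]
      split
      · have := ih y; omega
      · omega

theorem pvChain_getD (t : List Int) (y : Int) (i : Nat) (h : i ≤ pvChain y t) :
    (y :: t).getD i 0 = y + i := by
  induction t generalizing y i with
  | nil => simp [pvChain] at h; subst h; simp
  | cons z t ih =>
      by_cases hz : z = y + 1
      · cases i with
        | zero => simp
        | succ j =>
            have hcz : pvChain y (z :: t) = pvChain z t + 1 := by simp [pvChain, hz]
            have hj : j ≤ pvChain z t := by omega
            have h2 := ih z j hj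
            have h3 : ((y :: z :: t).getD (j + 1) 0) = (z :: t).getD j 0 := by simp
            rw [h3, h2, hz]; push_cast; ring
      · simp [pvChain, hz] at h; subst h; simp

theorem pvChain_max (t : List Int) (y : Int) {z : Int} {r : List Int}
    (h : t.drop (pvChain y t) = z :: r) : z ≠ y + pvChain y t + 1 := by
  induction t generalizing y with
  | nil => simp at h
  | cons w t ih =>
      by_cases hw : w = y + 1
      · have hcz : pvChain y (w :: t) = pvChain w t + 1 := by simp [pvChain, hw]
        rw [hcz] at h ⊢
        simp only [List.drop_succ_cons] at h
        have := ih w h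
        intro hcon; apply this
        rw [hw]; push_cast at hcon ⊢; omega
      · have hcz : pvChain y (w :: t) = 0 := by simp [pvChain, hw]
        rw [hcz] at h ⊢
        rw [List.drop_zero] at h
        cases h
        push_cast
        simpa using hw

theorem drop_chain (y : Int) (t : List Int) :
    (y :: t).drop (pvChain y t + 1) = t.drop (pvChain y t) := rfl

theorem getD_drop (l : List Int) (k j : Nat) : (l.drop k).getD j 0 = l.getD (k + j) 0 := by
  simp [List.getD_eq_getElem?_getD, List.getElem?_drop]

-- A-side: the accumulator is only appended to
theorem pvLoopA_acc (t : List Int) (acc : List String) (s e : Int) :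
    pvLoopA acc s e t = acc ++ pvLoopA [] s e t := by
  induction t generalizing acc s e with
  | nil => simp [pvLoopA]
  | cons y t ih =>
      simp only [pvLoopA]
      split
      · rw [ih acc, ih []]
      · rw [show ([] : List String) ++ [pvFmtA s e] = [pvFmtA s e] from rfl,
           ih (acc ++ [pvFmtA s e]), ih [pvFmtA s e]]
        simp

-- A-side peel: the loop emits the open run then restarts on the remainder
theorem pvLoopA_peel (t : List Int) (s e : Int) :
    pvLoopA [] s e t =
      pvFmtA s (e + (pvChain e t : Int)) :: find_closed_intervals (t.drop (pvChain e t)) := by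
  induction t generalizing s e with
  | nil => simp [pvLoopA, pvChain, find_closed_intervals]
  | cons y t ih =>
      by_cases hy : y = e + 1
      · simp only [pvLoopA, pvChain, if_pos hy, List.drop_succ_cons]
        rw [ih s y]
        congr 2
        rw [hy]; push_cast; ring
      · simp only [pvLoopA, pvChain, if_neg hy]
        rw [pvLoopA_acc]
        simp [find_closed_intervals]

theorem A_peel (y : Int) (t : List Int) :
    find_closed_intervals (y :: t) =
      pvFmtA y (y + (pvChain y t : Int)) :: find_closed_intervals (t.drop (pvChain y t)) := by
  simpa [find_closed_intervals] using pvLoopA_peel t y y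

-- B-side lemmas
theorem pvCuts_cons_head (z : Int) (r : List Int) :
    ∃ cr, pvCuts (z :: r) = 0 :: cr := by
  have h : List.range (z :: r).length = 0 :: (List.range r.length).map Nat.succ := by
    simp [List.length_cons, List.range_succ_eq_map]
  refine ⟨((List.range r.length).map Nat.succ).filter (pvIsCut (z :: r)), ?_⟩
  rw [pvCuts, h, List.filter_cons]
  simp [pvIsCut]

theorem pvCuts_nodup (l : List Int) : (pvCuts l).Nodup :=
  (List.nodup_range).filter _

-- within the first run, only index 0 is a cut
theorem filter_cut_range_k (y : Int) (t : List Int) :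
    (List.range (pvChain y t + 1)).filter (pvIsCut (y :: t)) = [0] := by
  have h0 : pvIsCut (y :: t) 0 = true := by simp [pvIsCut]
  have hnil : (List.range (pvChain y t)).filter (pvIsCut (y :: t) ∘ Nat.succ) = [] := by
    rw [List.filter_eq_nil_iff]
    intro i hi
    have hic : i < pvChain y t := List.mem_range.mp hi
    have g1 : (y :: t).getD (i + 1) 0 = y + ((i : Int) + 1) :=
      by rw [pvChain_getD t y (i + 1) (by omega)]; push_cast; ring
    have g2 : (y :: t).getD i 0 = y + (i : Int) := pvChain_getD t y i (by omega)
    have key : (y :: t).getD (i + 1) 0 = (y :: t).getD i 0 + 1 := by rw [g1, g2]; ring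
    simp only [Function.comp, Nat.succ_eq_add_one, pvIsCut, Nat.add_sub_cancel]
    rw [key]
    simp
  rw [List.range_succ_eq_map, List.filter_cons]
  simp only [h0, if_pos]
  rw [List.filter_map, hnil]
  rfl

-- past the first run, cuts coincide with the remainder's cuts (shifted)
theorem cut_shift (y : Int) (t : List Int) (j : Nat)
    (hj : j < (t.drop (pvChain y t)).length) :
    pvIsCut (y :: t) (pvChain y t + 1 + j) = pvIsCut (t.drop (pvChain y t)) j := by
  have hget : ∀ i : Nat, (y :: t).getD (pvChain y t + 1 + i) 0 = (t.drop (pvChain y t)).getD i 0 := by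
    intro i
    rw [← drop_chain, getD_drop]
  cases j with
  | zero =>
      obtain ⟨z, r, hzr⟩ : ∃ z r, t.drop (pvChain y t) = z :: r := by
        cases hres : t.drop (pvChain y t) with
        | nil => rw [hres] at hj; simp at hj
        | cons z r => exact ⟨z, r, rfl⟩
      have hR : pvIsCut (t.drop (pvChain y t)) 0 = true := by simp [pvIsCut]
      have hL : pvIsCut (y :: t) (pvChain y t + 1 + 0) = true := by
        have hz : (y :: t).getD (pvChain y t + 1 + 0) 0 = z := by
          rw [hget 0, hzr]; rfl
        have hprev : (y :: t).getD (pvChain y t + 1 + 0 - 1) 0 = y + (pvChain y t : Int) := by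
          rw [show pvChain y t + 1 + 0 - 1 = pvChain y t from by omega]
          exact pvChain_getD t y _ le_rfl
        have hne := pvChain_max t y hzr
        simp only [pvIsCut]
        rw [hz, hprev]
        simp [hne]
      rw [hL, hR]
  | succ j =>
      have e1 : (y :: t).getD (pvChain y t + 1 + (j + 1)) 0 = (t.drop (pvChain y t)).getD (j + 1) 0 :=
        hget (j + 1)
      have e2 : (y :: t).getD (pvChain y t + 1 + (j + 1) - 1) 0 = (t.drop (pvChain y t)).getD j 0 := by
        rw [show pvChain y t + 1 + (j + 1) - 1 = pvChain y t + 1 + j from by omega, hget j]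
      simp only [pvIsCut, Nat.add_sub_cancel]
      rw [e1, e2]
      simp

-- B-side peel of the cut list
theorem pvCuts_peel (y : Int) (t : List Int) :
    pvCuts (y :: t) =
      0 :: (pvCuts (t.drop (pvChain y t))).map (pvChain y t + 1 + ·) := by
  have hn : (y :: t).length = (pvChain y t + 1) + (t.drop (pvChain y t)).length := by
    have := pvChain_le y t
    simp [List.length_drop]
    omega
  rw [pvCuts, hn, List.range_add, List.filter_append, filter_cut_range_k, List.filter_map]
  rw [List.filter_congr (fun a ha => by
    have : a < (t.drop (pvChain y t)).length := List.mem_range.mp ha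
    show (pvIsCut (y :: t) ∘ (pvChain y t + 1 + ·)) a = pvIsCut (t.drop (pvChain y t)) a
    simpa using cut_shift y t a this)]
  rw [pvCuts]
  rfl

-- formatting the first run
theorem fmt_head (y : Int) (t : List Int) :
    pvFmtB (y :: t) 0 (pvChain y t + 1) = pvFmtA y (y + (pvChain y t : Int)) := by
  have hget : ((y :: t)[pvChain y t]?).getD 0 = y + (pvChain y t : Int) := by
    simpa [List.getD_eq_getElem?_getD] using pvChain_getD t y (pvChain y t) le_rfl
  rcases Nat.eq_zero_or_pos (pvChain y t) with h | h
  · simp [pvFmtB, pvFmtA, h]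
  · have h2 : ¬ y = y + (pvChain y t : Int) := by omega
    simp [pvFmtB, pvFmtA, h.ne', h2, hget]

-- formatting a later run only looks at the remainder
theorem fmt_shift (y : Int) (t : List Int) (a b : Nat) (hb : 1 ≤ b) :
    pvFmtB (y :: t) (pvChain y t + 1 + a) (pvChain y t + 1 + b) =
      pvFmtB (t.drop (pvChain y t)) a b := by
  have hget : ∀ i : Nat, (y :: t).getD (pvChain y t + 1 + i) 0 = (t.drop (pvChain y t)).getD i 0 := by
    intro i; rw [← drop_chain, getD_drop]
  have g1 := hget a
  have g2 : (y :: t).getD (pvChain y t + 1 + b - 1) 0 = (t.drop (pvChain y t)).getD (b - 1) 0 := by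
    rw [show pvChain y t + 1 + b - 1 = pvChain y t + 1 + (b - 1) from by omega, hget (b - 1)]
  have g3 : (pvChain y t + 1 + b) - (pvChain y t + 1 + a) = b - a := by omega
  simp only [pvFmtB]
  rw [g3, g1, g2]

-- B-side peel: B also emits the first run then B of the remainder
theorem B_peel (y : Int) (t : List Int) :
    find_closed_intervals_alt (y :: t) =
      pvFmtA y (y + (pvChain y t : Int)) :: find_closed_intervals_alt (t.drop (pvChain y t)) := by
  have hn : (y :: t).length = (pvChain y t + 1) + (t.drop (pvChain y t)).length := by
    have := pvChain_le y t
    simp [List.length_drop]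
    omega
  by_cases hres : t.drop (pvChain y t) = []
  · have hcr : pvCuts (t.drop (pvChain y t)) = [] := by rw [hres]; rfl
    have h1 : pvCuts (y :: t) = [0] := by rw [pvCuts_peel, hcr]; rfl
    have hlen : (y :: t).length = pvChain y t + 1 := by
      rw [hn, hres]; simp
    rw [show find_closed_intervals_alt (y :: t) =
          ((pvCuts (y :: t)).zip ((pvCuts (y :: t)).tail ++ [(y :: t).length])).map
            (fun p => pvFmtB (y :: t) p.1 p.2) from rfl]
    rw [h1, hlen, hres]
    simp [find_closed_intervals_alt, fmt_head y t, pvCuts]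
  · obtain ⟨w, r, hwr⟩ := List.exists_cons_of_ne_nil hres
    obtain ⟨cr', hcr0⟩ := pvCuts_cons_head w r
    have hcr : pvCuts (t.drop (pvChain y t)) = 0 :: cr' := by rw [hwr]; exact hcr0
    have hnodup : (0 :: cr').Nodup := by rw [← hcr]; exact pvCuts_nodup _
    have h0notin : 0 ∉ cr' := by simp at hnodup; exact hnodup.1
    have hm : 1 ≤ (t.drop (pvChain y t)).length := by rw [hwr]; simp
    -- unfold both sides of B
    rw [show find_closed_intervals_alt (y :: t) =
            ((pvCuts (y :: t)).zip ((pvCuts (y :: t)).tail ++ [(y :: t).length])).map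
              (fun p => pvFmtB (y :: t) p.1 p.2) from rfl,
          show find_closed_intervals_alt (t.drop (pvChain y t)) =
            ((pvCuts (t.drop (pvChain y t))).zip
              ((pvCuts (t.drop (pvChain y t))).tail ++ [(t.drop (pvChain y t)).length])).map
              (fun p => pvFmtB (t.drop (pvChain y t)) p.1 p.2) from rfl]
    rw [pvCuts_peel, hcr, hn]
    -- reshape the zipped boundary pairs into a mapped form
    have hzip :
        ((0 :: ((0 :: cr').map (pvChain y t + 1 + ·))).zip
          (((0 :: ((0 :: cr').map (pvChain y t + 1 + ·))).tail) ++
            [(pvChain y t + 1) + (t.drop (pvChain y t)).length])) =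
        (0, pvChain y t + 1) ::
          (((0 :: cr').zip (cr' ++ [(t.drop (pvChain y t)).length])).map
            (Prod.map (pvChain y t + 1 + ·) (pvChain y t + 1 + ·))) := by
      simp only [List.tail_cons, List.map_cons, List.cons_append, List.zip_cons_cons,
        Nat.add_zero]
      rw [← List.zip_map]
      simp
    rw [hzip]
    simp only [List.map_cons, List.map_map, List.tail_cons]
    congr 1
    · exact fmt_head y t
    · apply List.map_congr_left
      intro p hp
      have hp2 : p.2 ∈ cr' ++ [(t.drop (pvChain y t)).length] := by
        obtain ⟨x1, x2⟩ := p
        exact (List.of_mem_zip hp).2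
      have hb : 1 ≤ p.2 := by
        rcases List.mem_append.mp hp2 with h | h
        · rcases Nat.eq_zero_or_pos p.2 with h0 | h0
          · exact absurd (h0 ▸ h) h0notin
          · exact h0
        · rw [List.mem_singleton] at h
          rw [h]; exact hm
      show pvFmtB (y :: t) (pvChain y t + 1 + p.1) (pvChain y t + 1 + p.2) =
        pvFmtB (t.drop (pvChain y t)) p.1 p.2
      exact fmt_shift y t p.1 p.2 hb

theorem pv_main (n : Nat) : ∀ l : List Int, l.length ≤ n →
    find_closed_intervals l = find_closed_intervals_alt l := by
  induction n with
  | zero =>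
      intro l hl
      have : l = [] := List.eq_nil_of_length_eq_zero (Nat.le_zero.mp hl)
      subst this; rfl
  | succ n ih =>
      intro l hl
      match l with
      | [] => rfl
      | y :: t =>
          rw [A_peel, B_peel]
          congr 1
          apply ih
          have h1 : (t.drop (pvChain y t)).length ≤ t.length := by
            rw [List.length_drop]; omega
          simp at hl; omega

-- ===== VERDICT (by name: the statement is the Claim_ definition above) =====
theorem find_closed_intervals_spec : Claim_equal_find_closed_intervals := by
  intro years _
  show find_closed_intervals years = find_closed_intervals_alt years
  exact pv_main years.length years le_rfl
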